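-- pv_equiv track=rewrite | github.com/Andrew-Mereuta/networking | temporal_network.py | calculate_weight_node
-- ===== SOURCE A (Python) =====
-- def calculate_weight_node(edges, nodes):
--     weight_by_edge = {}
--     for edge in edges:
--         (n1, n2) = edge
--         if edge in weight_by_edge:
--             weight_by_edge[edge] = weight_by_edge[edge] + 1
--         elif (n2, n1) in weight_by_edge:
--             weight_by_edge[(n2, n1)] = weight_by_edge[(n2, n1)] + 1
--         else:
--             weight_by_edge[edge] = 1
--
--     node_strength = {node: 0 for node in nodes}
--     for node in nodes:
--         for edge, weight in weight_by_edge.items():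
--             if node in edge:
--                 node_strength[node] += weight
--     sorted_grouped = {}
--     degrees = dict(sorted(node_strength.items(), key=lambda item: item[1], reverse=True))
--     for key, val in sorted(degrees.items()):
--         if val in sorted_grouped:
--             sorted_grouped[val].append(key)
--         else:
--             sorted_grouped[val] = [key]
--     return dict(sorted(sorted_grouped.items(), key=lambda x: x[0], reverse=True))
-- ===== SOURCE B (Python) =====
-- def calculate_weight_node(edges, nodes):
--     strength = dict.fromkeys(nodes, 0)
--     for n1, n2 in edges:
--         if n1 in strength:
--             strength[n1] += 1
--         if n2 != n1 and n2 in strength: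
--             strength[n2] += 1
--     groups = {}
--     for node in sorted(strength):
--         groups.setdefault(strength[node], []).append(node)
--     return {s: groups[s] for s in sorted(groups, reverse=True)}
-- ===== Notes on version B (the rewrite author's own statement) =====
-- stated objective: faster
-- what changed: B drops A's edge-multiplicity dict and the nodes-outer/weights-inner nested scan entirely: one scatter pass over edges increments a counter per endpoint that is a known node, then nodes are grouped by walking the sorted keys once, instead of A's per-node rescan of the whole merged-edge table.
-- intended difference: On node lists that repeat a node having at least one incident edge, A's outer loop adds that node's incident-edge total once per duplicate occurrence and returns the strength multiplied by the node's multiplicity, while B counts each distinct node's incident edges exactly once, which is the intended strength. — e.g. on calculate_weight_node([(1, 2)], [1, 1, 2]): A returns [(2, [1]), (1, [2])], B returns [(1, [1, 2])]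
import Mathlib
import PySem

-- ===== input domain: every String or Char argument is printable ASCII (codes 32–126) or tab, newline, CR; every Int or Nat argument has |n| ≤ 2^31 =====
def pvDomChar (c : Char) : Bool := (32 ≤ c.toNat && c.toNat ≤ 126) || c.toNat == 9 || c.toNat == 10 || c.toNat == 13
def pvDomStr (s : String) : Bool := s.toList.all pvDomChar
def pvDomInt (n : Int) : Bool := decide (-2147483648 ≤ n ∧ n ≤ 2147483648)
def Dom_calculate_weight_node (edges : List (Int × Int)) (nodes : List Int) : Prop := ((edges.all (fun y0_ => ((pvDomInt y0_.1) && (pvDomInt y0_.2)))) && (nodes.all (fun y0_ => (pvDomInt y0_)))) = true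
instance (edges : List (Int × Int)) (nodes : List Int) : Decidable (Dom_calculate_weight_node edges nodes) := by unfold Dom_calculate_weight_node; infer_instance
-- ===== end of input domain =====

-- B replaces A's nodes×edge-table nested scan by a single counting pass over the edges (faster); return-value
-- equivalence is claimed outside D_ below (A multiplies a duplicated node's strength by its multiplicity).

-- ===== PORT A =====
-- phase 1 of A: the edge-multiplicity map, (n1,n2) merged with (n2,n1)
def aWbe (edges : List (Int × Int)) : PySem.Dict (Int × Int) Int :=
  edges.foldl (fun d edge =>
    if d.contains edge then d.insert edge (d.getD edge 0 + 1)
    else if d.contains (edge.2, edge.1) then d.insert (edge.2, edge.1) (d.getD (edge.2, edge.1) 0 + 1)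
    else d.insert edge 1) PySem.Dict.empty

-- phase 2 of A: node_strength (the `node_strength[node] += weight` lookup always finds the key, so getD 0 is exact)
def aStrength (edges : List (Int × Int)) (nodes : List Int) : PySem.Dict Int Int :=
  let ns0 : PySem.Dict Int Int := nodes.foldl (fun d node => d.insert node 0) PySem.Dict.empty
  nodes.foldl (fun d node =>
    (aWbe edges).items.foldl (fun d ew =>
      if ew.1.1 == node || ew.1.2 == node then d.insert node (d.getD node 0 + ew.2) else d) d) ns0

-- phase 3 of A: degrees (value-descending dict), then group ascending, then key-descending dict
def aGroup (ns : PySem.Dict Int Int) : List (Int × List Int) :=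
  let degrees : PySem.Dict Int Int := PySem.Dict.ofList (PySem.List.sorted ns.items (fun p => p.2) true)
  let grouped : PySem.Dict Int (List Int) :=
    (PySem.List.sorted2 degrees.items (fun p => p.1) (fun p => p.2)).foldl
      (fun g p => if g.contains p.2 then g.insert p.2 (g.getD p.2 [] ++ [p.1]) else g.insert p.2 [p.1])
      PySem.Dict.empty
  (PySem.Dict.ofList (PySem.List.sorted grouped.items (fun p => p.1) true)).items

def calculate_weight_node (edges : List (Int × Int)) (nodes : List Int) : List (Int × List Int) :=
  aGroup (aStrength edges nodes)

-- ===== PORT B =====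
-- B phase 1: strength = dict.fromkeys(nodes, 0), then one counting pass over the edges
def bStrength (edges : List (Int × Int)) (nodes : List Int) : PySem.Dict Int Int :=
  let strength0 : PySem.Dict Int Int := PySem.Dict.ofList (nodes.map (fun n => (n, (0 : Int))))
  edges.foldl (fun d e =>
    let d1 := if d.contains e.1 then d.insert e.1 (d.getD e.1 0 + 1) else d
    if e.2 != e.1 && d1.contains e.2 then d1.insert e.2 (d1.getD e.2 0 + 1) else d1) strength0

-- B phase 2: group the sorted keys by strength (setdefault(..).append = Dict.modify), emit keys descending
def bGroup (strength : PySem.Dict Int Int) : List (Int × List Int) :=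
  let groups : PySem.Dict Int (List Int) :=
    (PySem.List.sorted strength.keys (fun x => x)).foldl
      (fun g n => g.modify (strength.getD n 0) [] (fun l => l ++ [n])) PySem.Dict.empty
  (PySem.List.sorted groups.keys (fun x => x) true).map (fun s => (s, groups.getD s []))

def calculate_weight_node_alt (edges : List (Int × Int)) (nodes : List Int) : List (Int × List Int) :=
  bGroup (bStrength edges nodes)

-- ===== PRECONDITION & SPEC =====
-- On node lists that repeat a node having at least one incident edge, A's outer loop adds that node's
-- incident-edge total once per duplicate occurrence (strength × multiplicity), while B counts each distinct
-- node's incident edges exactly once, which is the intended strength.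
def D_calculate_weight_node (edges : List (Int × Int)) (nodes : List Int) : Prop :=
  ∃ n ∈ nodes, 2 ≤ nodes.count n ∧ edges.any (fun e => e.1 == n || e.2 == n) = true
instance (edges : List (Int × Int)) (nodes : List Int) : Decidable (D_calculate_weight_node edges nodes) := by
  unfold D_calculate_weight_node; infer_instance

def Spec_calculate_weight_node (edges : List (Int × Int)) (nodes : List Int) (out : List (Int × List Int)) : Prop :=
  ¬ D_calculate_weight_node edges nodes → out = calculate_weight_node_alt edges nodes
instance (edges : List (Int × Int)) (nodes : List Int) (out : List (Int × List Int)) : Decidable (Spec_calculate_weight_node edges nodes out) := by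
  unfold Spec_calculate_weight_node; infer_instance

def pvDiffWitness_calculate_weight_node : (List (Int × Int)) × List Int := ([(1, 2)], [1, 1, 2])
def pvDiffWitnessOut_calculate_weight_node : (List (Int × List Int)) × (List (Int × List Int)) :=
  ([(2, [1]), (1, [2])], [(1, [1, 2])])

-- ===== CLAIM (what is proved, stated in full; the proofs are below) =====
def Claim_unchanged_calculate_weight_node : Prop := ∀ (edges : List (Int × Int)) (nodes : List Int), Dom_calculate_weight_node edges nodes → Spec_calculate_weight_node edges nodes (calculate_weight_node edges nodes)
def Claim_changed_calculate_weight_node : Prop := Dom_calculate_weight_node (pvDiffWitness_calculate_weight_node.1) (pvDiffWitness_calculate_weight_node.2) ∧ D_calculate_weight_node (pvDiffWitness_calculate_weight_node.1) (pvDiffWitness_calculate_weight_node.2) ∧ calculate_weight_node (pvDiffWitness_calculate_weight_node.1) (pvDiffWitness_calculate_weight_node.2) = pvDiffWitnessOut_calculate_weight_node.1 ∧ calculate_weight_node_alt (pvDiffWitness_calculate_weight_node.1) (pvDiffWitness_calculate_weight_node.2) = pvDiffWitnessOut_calculate_weight_node.2 ∧ pvDiffWitnessOut_calculate_weight_node.1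 ≠ pvDiffWitnessOut_calculate_weight_node.2

-- ===== LEMMAS AND PROOFS =====
def incB (n : Int) (e : Int × Int) : Bool := e.1 == n || e.2 == n
def SI (L : List ((Int × Int) × Int)) (n : Int) : Int :=
  ((L.filter (fun ew => incB n ew.1)).map (fun ew => ew.2)).sum
theorem SI_cons (p : (Int × Int) × Int) (t : List ((Int × Int) × Int)) (n : Int) :
    SI (p :: t) n = (if incB n p.1 then p.2 else 0) + SI t n := by
  by_cases h : incB n p.1 <;> simp [SI, h]
theorem SI_map_rep (L : List ((Int × Int) × Int)) (k : Int × Int) (v w n : Int)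
    (hnd : (L.map Prod.fst).Nodup) (hm : (k, v) ∈ L) :
    SI (L.map (fun p => if p.1 == k then (k, w) else p)) n
      = SI L n + (if incB n k then w - v else 0) := by
  induction L with
  | nil => cases hm
  | cons p t ih =>
    simp only [List.map_cons, List.nodup_cons, List.mem_map] at hnd
    rcases List.mem_cons.mp hm with h | h
    · -- p = (k, v)
      subst h
      have hrep : t.map (fun p => if p.1 == k then (k, w) else p) = t := by
        apply List.map_congr_left ?_ |>.trans (List.map_id t)
        intro q hq
        have : q.1 ≠ k := by
          intro he; exact hnd.1 ⟨q, hq, he⟩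
        simp [this]
      simp only [List.map_cons, beq_self_eq_true, if_pos, SI_cons, hrep]
      simp [incB]; split_ifs <;> ring
    · -- (k,v) ∈ t, so p.1 ≠ k
      have hp1 : p.1 ≠ k := by
        intro he
        exact hnd.1 ⟨(k, v), h, by simp [he]⟩
      have hfp : (if (p.1 == k) = true then (k, w) else p) = p := by simp [hp1]
      rw [List.map_cons, hfp, SI_cons, SI_cons, ih hnd.2 h]; ring
theorem SI_insert (d : PySem.Dict (Int × Int) Int) (k : Int × Int) (w n : Int)
    (hnd : d.keys.Nodup) :
    SI (d.insert k w).items n = SI d.items n + (if incB n k then w - d.getD k 0 else 0) := by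
  by_cases hc : d.contains k
  · have hg : ∃ v, d.get? k = some v := by
      have := PySem.Dict.contains_eq_isSome_get? (d := d) (k := k)
      rw [hc] at this
      exact Option.isSome_iff_exists.mp this.symm
    obtain ⟨v, hv⟩ := hg
    have hmem : (k, v) ∈ d.items := PySem.Dict.mem_items_of_get?_eq_some d hv
    have hgD : d.getD k 0 = v := PySem.Dict.getD_of_get?_eq_some d 0 hv
    have hnd' : (d.items.map Prod.fst).Nodup := by
      simpa [PySem.Dict.keys] using hnd
    rw [PySem.Dict.items_insert_of_contains d w hc, hgD]
    exact SI_map_rep d.items k v w n hnd' hmem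
  · rw [PySem.Dict.items_insert_of_not_contains d w (by simpa using hc)]
    rw [PySem.Dict.getD_of_not_contains d 0 (by simpa using hc)]
    by_cases h : incB n k <;> simp [SI, List.filter_append, h]
theorem aWbe_aux (es : List (Int × Int)) (n : Int) :
    ∀ d : PySem.Dict (Int × Int) Int, d.keys.Nodup →
      (es.foldl (fun d edge =>
        if d.contains edge then d.insert edge (d.getD edge 0 + 1)
        else if d.contains (edge.2, edge.1) then d.insert (edge.2, edge.1) (d.getD (edge.2, edge.1) 0 + 1)
        else d.insert edge 1) d).keys.Nodup ∧
      SI (es.foldl (fun d edge =>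
        if d.contains edge then d.insert edge (d.getD edge 0 + 1)
        else if d.contains (edge.2, edge.1) then d.insert (edge.2, edge.1) (d.getD (edge.2, edge.1) 0 + 1)
        else d.insert edge 1) d).items n = SI d.items n + (es.countP (incB n) : Int) := by
  induction es with
  | nil => intro d hnd; simpa using hnd
  | cons e t ih =>
    intro d hnd
    have hinc : incB n (e.2, e.1) = incB n e := by simp [incB, Bool.or_comm]
    set d' := if d.contains e then d.insert e (d.getD e 0 + 1)
      else if d.contains (e.2, e.1) then d.insert (e.2, e.1) (d.getD (e.2, e.1) 0 + 1)
      else d.insert e 1 with hd'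
    have hnd' : d'.keys.Nodup := by
      rw [hd']; split_ifs <;> exact PySem.Dict.nodup_keys_insert _ _ _ hnd
    have hstep : SI d'.items n = SI d.items n + (if incB n e then 1 else 0) := by
      rw [hd']
      by_cases h1 : d.contains e = true
      · rw [if_pos h1, SI_insert d e _ n hnd]; split_ifs <;> ring
      · rw [if_neg h1]
        by_cases h2 : d.contains (e.2, e.1) = true
        · rw [if_pos h2, SI_insert d (e.2, e.1) _ n hnd, hinc]; split_ifs <;> ring
        · rw [if_neg h2, SI_insert d e 1 n hnd,
            PySem.Dict.getD_of_not_contains d 0 (by simpa using h1)]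
          split_ifs <;> ring
    have := ih d' hnd'
    refine ⟨this.1, ?_⟩
    rw [List.foldl_cons]
    rw [this.2, hstep, List.countP_cons]
    push_cast
    split_ifs <;> ring
theorem aInner (L : List ((Int × Int) × Int)) :
    ∀ (d : PySem.Dict Int Int) (node : Int), d.contains node = true →
      (L.foldl (fun d ew => if ew.1.1 == node || ew.1.2 == node then d.insert node (d.getD node 0 + ew.2) else d) d).keys = d.keys ∧
      ∀ m : Int, (L.foldl (fun d ew => if ew.1.1 == node || ew.1.2 == node then d.insert node (d.getD node 0 + ew.2) else d) d).getD m 0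
        = d.getD m 0 + (if m = node then SI L node else 0) := by
  induction L with
  | nil => intro d node _; simp [SI]
  | cons ew t ih =>
    intro d node hc
    have hinc : (ew.1.1 == node || ew.1.2 == node) = incB node ew.1 := by simp [incB]
    by_cases h : incB node ew.1
    · set d' := d.insert node (d.getD node 0 + ew.2) with hd'
      have hc' : d'.contains node = true := PySem.Dict.contains_insert_self d node _
      have hkeys : d'.keys = d.keys := PySem.Dict.keys_insert_of_contains d _ hc
      obtain ⟨ik, ig⟩ := ih d' node hc'
      rw [List.foldl_cons, hinc, if_pos h]
      refine ⟨by rw [ik, hkeys], ?_⟩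
      intro m
      rw [ig m, SI_cons, if_pos h, hd', PySem.Dict.getD_insert]
      by_cases hm : m = node <;> simp [hm]
      ring
    · obtain ⟨ik, ig⟩ := ih d node hc
      rw [List.foldl_cons, hinc, if_neg (by simpa using h)]
      refine ⟨ik, ?_⟩
      intro m
      rw [ig m, SI_cons]
      simp [h]
theorem aOuter (L : List ((Int × Int) × Int)) (ns : List Int) :
    ∀ d : PySem.Dict Int Int, (∀ x ∈ ns, d.contains x = true) →
      (ns.foldl (fun d node =>
        L.foldl (fun d ew => if ew.1.1 == node || ew.1.2 == node then d.insert node (d.getD node 0 + ew.2) else d) d) d).keys = d.keys ∧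
      ∀ m : Int, (ns.foldl (fun d node =>
        L.foldl (fun d ew => if ew.1.1 == node || ew.1.2 == node then d.insert node (d.getD node 0 + ew.2) else d) d) d).getD m 0
        = d.getD m 0 + (ns.count m : Int) * SI L m := by
  induction ns with
  | nil => intro d _; simp
  | cons node rest ih =>
    intro d hc
    obtain ⟨ik1, ig1⟩ := aInner L d node (hc node (by simp))
    set d1 := L.foldl (fun d ew => if ew.1.1 == node || ew.1.2 == node then d.insert node (d.getD node 0 + ew.2) else d) d with hd1
    have hc1 : ∀ x ∈ rest, d1.contains x = true := by
      intro x hx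
      have := hc x (by simp [hx])
      rw [PySem.Dict.contains_iff_mem_keys] at this ⊢
      rw [ik1]; exact this
    obtain ⟨ik2, ig2⟩ := ih d1 hc1
    rw [List.foldl_cons]
    refine ⟨by rw [ik2, ik1], ?_⟩
    intro m
    rw [ig2 m, ig1 m, List.count_cons]
    by_cases hm : m = node
    · subst hm; simp; ring
    · have : ¬ (node == m) = true := by simpa using fun he => hm (by simpa using he.symm)
      simp [hm, this]


theorem SI_aWbe (edges : List (Int × Int)) (n : Int) :
    SI (aWbe edges).items n = (edges.countP (incB n) : Int) := by
  have h := aWbe_aux edges n PySem.Dict.empty (by simp [pysem])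
  simpa [aWbe, SI, PySem.Dict.empty] using h.2
theorem ns0_keys (nodes : List Int) :
    (nodes.foldl (fun d node => d.insert node (0 : Int)) PySem.Dict.empty).keys = PySem.Set.ofList nodes := by
  have := PySem.Dict.keys_foldl_insert nodes (fun _ _ => (0 : Int)) PySem.Dict.empty
  simpa [PySem.Dict.keys_empty, PySem.Set.update_nil_left] using this
theorem ns0_getD (nodes : List Int) (m : Int) :
    ∀ d : PySem.Dict Int Int, d.getD m 0 = 0 →
      (nodes.foldl (fun d node => d.insert node (0 : Int)) d).getD m 0 = 0 := by
  induction nodes with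
  | nil => intro d h; simpa using h
  | cons x t ih =>
    intro d h
    rw [List.foldl_cons]
    exact ih _ (by rw [PySem.Dict.getD_insert]; split_ifs <;> simp [h])
theorem aStrength_keys (edges : List (Int × Int)) (nodes : List Int) :
    (aStrength edges nodes).keys = PySem.Set.ofList nodes := by
  unfold aStrength
  have hcon : ∀ x ∈ nodes, (nodes.foldl (fun d node => d.insert node (0:Int)) PySem.Dict.empty).contains x = true := by
    intro x hx
    rw [PySem.Dict.contains_iff_mem_keys, ns0_keys, PySem.Set.mem_ofList]
    exact hx
  have := (aOuter (aWbe edges).items nodes _ hcon).1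
  simpa [ns0_keys] using this
theorem aStrength_getD (edges : List (Int × Int)) (nodes : List Int) (m : Int) :
    (aStrength edges nodes).getD m 0 = (nodes.count m : Int) * (edges.countP (incB m) : Int) := by
  unfold aStrength
  have hcon : ∀ x ∈ nodes, (nodes.foldl (fun d node => d.insert node (0:Int)) PySem.Dict.empty).contains x = true := by
    intro x hx
    rw [PySem.Dict.contains_iff_mem_keys, ns0_keys, PySem.Set.mem_ofList]
    exact hx
  have h := (aOuter (aWbe edges).items nodes _ hcon).2 m
  rw [h, ns0_getD nodes m PySem.Dict.empty (by simp [pysem]), SI_aWbe]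
  ring

theorem b0_keys (nodes : List Int) :
    (PySem.Dict.ofList (nodes.map (fun n => (n, (0 : Int))))).keys = PySem.Set.ofList nodes := by
  have := PySem.Dict.keys_foldl_insert_key (ν := Int) (nodes.map (fun n => (n, (0 : Int))))
    Prod.fst (fun _ p => p.2) PySem.Dict.empty
  have h2 : List.map (Prod.fst ∘ fun n : Int => (n, (0 : Int))) nodes = nodes :=
    (List.map_congr_left (fun a _ => rfl)).trans (List.map_id nodes)
  simp only [PySem.Dict.ofList, PySem.Dict.update]
  simpa [List.map_map, h2, PySem.Dict.keys_empty, PySem.Set.update_nil_left] using this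
theorem b0_getD (nodes : List Int) (m : Int) :
    (PySem.Dict.ofList (nodes.map (fun n => (n, (0 : Int))))).getD m 0 = 0 := by
  suffices h : ∀ d : PySem.Dict Int Int, d.getD m 0 = 0 →
      ((nodes.map (fun n => (n, (0 : Int)))).foldl (fun acc p => acc.insert p.1 p.2) d).getD m 0 = 0 by
    simpa [PySem.Dict.ofList, PySem.Dict.update] using h PySem.Dict.empty (by simp [pysem])
  induction nodes with
  | nil => intro d h; simpa using h
  | cons x t ih =>
    intro d h
    rw [List.map_cons, List.foldl_cons]
    exact ih _ (by rw [PySem.Dict.getD_insert]; split_ifs <;> simp [h])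
theorem bFold (es : List (Int × Int)) :
    ∀ d : PySem.Dict Int Int,
      (es.foldl (fun d e =>
        let d1 := if d.contains e.1 then d.insert e.1 (d.getD e.1 0 + 1) else d
        if e.2 != e.1 && d1.contains e.2 then d1.insert e.2 (d1.getD e.2 0 + 1) else d1) d).keys = d.keys ∧
      ∀ m : Int, d.contains m = true →
        (es.foldl (fun d e =>
          let d1 := if d.contains e.1 then d.insert e.1 (d.getD e.1 0 + 1) else d
          if e.2 != e.1 && d1.contains e.2 then d1.insert e.2 (d1.getD e.2 0 + 1) else d1) d).getD m 0
          = d.getD m 0 + (es.countP (incB m) : Int) := by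
  induction es with
  | nil => intro d; simp
  | cons e t ih =>
    intro d
    set d1 := if d.contains e.1 then d.insert e.1 (d.getD e.1 0 + 1) else d with hd1
    set d2 := if e.2 != e.1 && d1.contains e.2 then d1.insert e.2 (d1.getD e.2 0 + 1) else d1 with hd2
    have hk1 : d1.keys = d.keys := by
      rw [hd1]; split_ifs with h
      · exact PySem.Dict.keys_insert_of_contains d _ h
      · rfl
    have hc1 : ∀ x, d1.contains x = d.contains x := by
      intro x
      have h := PySem.Dict.contains_iff_mem_keys d1 x
      rw [hk1, ← PySem.Dict.contains_iff_mem_keys d x] at h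
      exact Bool.eq_iff_iff.mpr h
    have hk2 : d2.keys = d.keys := by
      rw [hd2]; split_ifs with h
      · rw [PySem.Dict.keys_insert_of_contains d1 _ (by
          rcases Bool.and_eq_true_iff.mp h with ⟨_, h2⟩; exact h2), hk1]
      · exact hk1
    obtain ⟨ik, ig⟩ := ih d2
    constructor
    · rw [List.foldl_cons, ← hd1, ← hd2, ik, hk2]
    · intro m hm
      have hm2 : d2.contains m = true := by
        rw [PySem.Dict.contains_iff_mem_keys, hk2, ← PySem.Dict.contains_iff_mem_keys]; exact hm
      have hg1 : d1.getD m 0 = d.getD m 0 + (if e.1 = m then 1 else 0) := by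
        rw [hd1]
        by_cases h1 : e.1 = m
        · subst h1
          rw [if_pos hm, PySem.Dict.getD_insert]
          simp
        · split_ifs with h2
          · rw [PySem.Dict.getD_insert, if_neg (show ¬ m = e.1 from fun he => h1 he.symm)]
            ring
          · ring
      have hg2 : d2.getD m 0 = d1.getD m 0 + (if e.2 = m ∧ e.2 ≠ e.1 then 1 else 0) := by
        rw [hd2]
        by_cases h1 : e.2 = m ∧ e.2 ≠ e.1
        · have hcm : d1.contains e.2 = true := by rw [h1.1, hc1]; exact hm
          have hne : ¬ m = e.1 := by rw [← h1.1]; exact h1.2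
          rw [if_pos (by simp [hcm, bne_iff_ne.mpr h1.2]), PySem.Dict.getD_insert, if_pos h1.1.symm]
          simp [h1.1, hne]
        · split_ifs with h2
          · rcases Bool.and_eq_true_iff.mp h2 with ⟨hb, _⟩
            have hne : e.2 ≠ e.1 := bne_iff_ne.mp hb
            have hem : e.2 ≠ m := fun he => h1 ⟨he, hne⟩
            rw [PySem.Dict.getD_insert, if_neg (show ¬ m = e.2 from fun he => hem he.symm)]
            ring
          · ring
      have hdelta : (if e.1 = m then (1:Int) else 0) + (if e.2 = m ∧ e.2 ≠ e.1 then (1:Int) else 0)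
          = (if incB m e then 1 else 0) := by
        simp only [incB]
        by_cases h1 : e.1 = m <;> by_cases h2 : e.2 = m <;> by_cases h3 : e.2 = e.1 <;>
          simp [h1, h2, h3] <;> omega
      rw [List.foldl_cons, ← hd1, ← hd2, ig m hm2, hg2, hg1, List.countP_cons]
      push_cast
      rw [← hdelta]
      ring
theorem bStrength_keys (edges : List (Int × Int)) (nodes : List Int) :
    (bStrength edges nodes).keys = PySem.Set.ofList nodes := by
  unfold bStrength
  rw [(bFold edges _).1, b0_keys]
theorem bStrength_getD (edges : List (Int × Int)) (nodes : List Int) (m : Int) (hm : m ∈ nodes) :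
    (bStrength edges nodes).getD m 0 = (edges.countP (incB m) : Int) := by
  unfold bStrength
  have hc : (PySem.Dict.ofList (nodes.map (fun n => (n, (0 : Int))))).contains m = true := by
    rw [PySem.Dict.contains_iff_mem_keys, b0_keys, PySem.Set.mem_ofList]; exact hm
  rw [(bFold edges _).2 m hc, b0_getD]
  ring
theorem pw_strict {α : Type} (key : α → Int) (l : List α)
    (h1 : l.Pairwise (fun a b => key a ≤ key b)) (h2 : (l.map key).Nodup) :
    l.Pairwise (fun a b => key a < key b) := by
  have h2' : l.Pairwise (fun a b => key a ≠ key b) := List.pairwise_map.mp h2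
  exact (h1.and h2').imp (fun h => lt_of_le_of_ne h.1 h.2)
theorem ofList_items_of_nodup {ν : Type} (L : List (Int × ν))
    (h : (L.map Prod.fst).Nodup) : (PySem.Dict.ofList L).items = L := by
  have := PySem.Dict.items_foldl_insert_fresh L Prod.fst Prod.snd PySem.Dict.empty
    (fun a _ => by simp [pysem]) h
  simpa [PySem.Dict.ofList, PySem.Dict.update, PySem.Dict.empty] using this
-- pairwise-(fst ≤) is preserved by the insertion step of A's tuple sort
theorem insertBy_pw (x : Int × Int) (l : List (Int × Int))
    (h : l.Pairwise (fun a b => a.1 ≤ b.1)) :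
    (PySem.List.insertBy
      (fun a b => decide (a.1 < b.1) || !decide (b.1 < a.1) && decide (a.2 < b.2)) x l).Pairwise
      (fun a b => a.1 ≤ b.1) := by
  induction l with
  | nil => simp [PySem.List.insertBy]
  | cons y ys ih =>
    rw [PySem.List.insertBy]
    split_ifs with hb
    · have hxy : x.1 ≤ y.1 := by
        rcases Bool.or_eq_true_iff.mp hb with h1 | h1
        · exact le_of_lt (by simpa using h1)
        · exact le_of_not_gt (by simpa using (Bool.and_eq_true_iff.mp h1).1)
      have hy : ∀ z ∈ y :: ys, x.1 ≤ z.1 := by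
        intro z hz
        rcases List.mem_cons.mp hz with rfl | hz
        · exact hxy
        · exact le_trans hxy (List.rel_of_pairwise_cons h hz)
      exact List.pairwise_cons.mpr ⟨hy, h⟩
    · have hyx : y.1 ≤ x.1 := by
        have h1 : ¬ x.1 < y.1 := by
          intro hlt; exact hb (by simp [hlt])
        exact le_of_not_gt h1
      obtain ⟨hy, hys⟩ := List.pairwise_cons.mp h
      refine List.pairwise_cons.mpr ⟨?_, ih hys⟩
      intro z hz
      rcases (PySem.List.insertBy_mem_iff _ x z ys).mp hz with rfl | hz
      · exact hyx
      · exact hy z hz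
theorem foldl_insertBy_pw (t : List (Int × Int)) :
    ∀ acc : List (Int × Int), acc.Pairwise (fun a b => a.1 ≤ b.1) →
      (t.foldl (fun acc x => PySem.List.insertBy
        (fun a b => decide (a.1 < b.1) || !decide (b.1 < a.1) && decide (a.2 < b.2)) x acc) acc).Pairwise
        (fun a b => a.1 ≤ b.1) := by
  induction t with
  | nil => intro acc hacc; simpa using hacc
  | cons x t ih =>
    intro acc hacc
    rw [List.foldl_cons]
    exact ih _ (insertBy_pw x acc hacc)
theorem sorted2_pairs_eq (xs ys : List (Int × Int)) (hp : ys.Perm xs)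
    (hs : ys.Pairwise (fun a b => a.1 < b.1)) :
    PySem.List.sorted2 xs (fun p => p.1) (fun p => p.2) = ys := by
  have hpw : (PySem.List.sorted2 xs (fun p => p.1) (fun p => p.2)).Pairwise
      (fun a b => a.1 ≤ b.1) := by
    rw [PySem.List.sorted2]
    exact foldl_insertBy_pw xs [] (by simp)
  have hperm : (PySem.List.sorted2 xs (fun p => p.1) (fun p => p.2)).Perm ys :=
    (PySem.List.sorted2_perm xs _ _ false).trans hp.symm
  have hndys : (ys.map Prod.fst).Nodup :=
    List.pairwise_map.mpr (hs.imp (fun h => ne_of_lt h))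
  have hnd : ((PySem.List.sorted2 xs (fun p => p.1) (fun p => p.2)).map Prod.fst).Nodup :=
    (hperm.map Prod.fst).nodup_iff.mpr hndys
  have hpw' := pw_strict Prod.fst _ hpw hnd
  exact List.Perm.eq_of_pairwise
    (fun a b _ _ hab hba => absurd hba (not_lt.mpr (le_of_lt hab)))
    hpw' hs hperm


theorem aGroup_eq_bGroup (d : PySem.Dict Int Int) (hnd : d.keys.Nodup) :
    aGroup d = bGroup d := by
  have hndItems : (d.items.map Prod.fst).Nodup := by simpa [PySem.Dict.keys] using hnd
  -- the common strictly key-ascending item list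
  set S := PySem.List.sorted d.items (fun p => p.1) with hS
  have hSperm : S.Perm d.items := PySem.List.sorted_perm d.items _ false
  have hSnd : (S.map Prod.fst).Nodup := (hSperm.map Prod.fst).nodup_iff.mpr hndItems
  have hSlt : S.Pairwise (fun a b => a.1 < b.1) :=
    pw_strict Prod.fst S (PySem.List.sorted_pairwise d.items _) hSnd
  -- A's degrees dict keeps the value-sorted list as its items
  set V := PySem.List.sorted d.items (fun p => p.2) true with hV
  have hVnd : (V.map Prod.fst).Nodup :=
    ((PySem.List.sorted_perm d.items _ true).map Prod.fst).nodup_iff.mpr hndItems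
  have hdeg : (PySem.Dict.ofList V).items = V := ofList_items_of_nodup V hVnd
  -- A's tuple sort of the degrees items is S
  have hsort2 : PySem.List.sorted2 V (fun p => p.1) (fun p => p.2) = S :=
    sorted2_pairs_eq V S (hSperm.trans (PySem.List.sorted_perm d.items _ true).symm) hSlt
  -- B's iteration pairs are S as well
  have hkeysnd : (PySem.List.sorted d.keys (fun x => x)).Nodup :=
    (PySem.List.sorted_perm d.keys _ false).nodup_iff.mpr hnd
  have hmapS : S = (PySem.List.sorted d.keys (fun x => x)).map (fun n => (n, d.getD n 0)) := by
    rw [hS]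
    apply PySem.List.sorted_eq_of_perm_of_pairwise_lt
    · rw [PySem.Dict.items_eq_map_keys d hnd 0]
      exact (PySem.List.sorted_perm d.keys _ false).map _
    · refine List.pairwise_map.mpr ?_
      exact pw_strict (fun x => x) _ (by simpa using PySem.List.sorted_pairwise d.keys (fun x => x)) (by simpa using hkeysnd)
  -- the two grouping folds agree
  have hstep : (fun (g : PySem.Dict Int (List Int)) (p : Int × Int) =>
      if g.contains p.2 then g.insert p.2 (g.getD p.2 [] ++ [p.1]) else g.insert p.2 [p.1])
      = (fun (g : PySem.Dict Int (List Int)) (p : Int × Int) => g.modify p.2 [] (fun l => l ++ [p.1])) := by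
    funext g p
    by_cases hc : g.contains p.2
    · simp [PySem.Dict.modify, hc]
    · simp [PySem.Dict.modify, hc, PySem.Dict.getD_of_not_contains g [] (by simpa using hc)]
  set G := S.foldl (fun (g : PySem.Dict Int (List Int)) (p : Int × Int) =>
      g.modify p.2 [] (fun l => l ++ [p.1])) PySem.Dict.empty with hG
  have hGnd : G.keys.Nodup := by
    rw [hG]
    exact PySem.Dict.nodup_keys_foldl_modify_key S Prod.snd [] (fun _ p => (fun l => l ++ [p.1])) PySem.Dict.empty (by simp [pysem])
  have hGitemsnd : (G.items.map Prod.fst).Nodup := by simpa [PySem.Dict.keys] using hGnd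
  -- both returns
  have hBfold : (PySem.List.sorted d.keys (fun x => x)).foldl
      (fun g n => g.modify (d.getD n 0) [] (fun l => l ++ [n])) PySem.Dict.empty = G := by
    rw [hG, hmapS, List.foldl_map]
  have hfinnd : ((PySem.List.sorted G.items (fun p => p.1) true).map Prod.fst).Nodup :=
    ((PySem.List.sorted_perm G.items _ true).map Prod.fst).nodup_iff.mpr hGitemsnd
  have hsortednd : (PySem.List.sorted G.keys (fun x => x) true).Nodup :=
    (PySem.List.sorted_perm G.keys _ true).nodup_iff.mpr hGnd
  have hfinal : PySem.List.sorted G.items (fun p => p.1) true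
      = (PySem.List.sorted G.keys (fun x => x) true).map (fun s => (s, G.getD s [])) := by
    apply PySem.List.sorted_rev_eq_of_perm_of_pairwise_gt
    · rw [PySem.Dict.items_eq_map_keys G hGnd []]
      exact (PySem.List.sorted_perm G.keys _ true).map _
    · refine List.pairwise_map.mpr ?_
      have h1 : (PySem.List.sorted G.keys (fun x => x) true).Pairwise (fun a b => b ≤ a) := by
        simpa using PySem.List.sorted_pairwise_rev G.keys (fun x => x)
      have h2 : (PySem.List.sorted G.keys (fun x => x) true).Pairwise (fun a b : Int => a ≠ b) :=
        hsortednd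
      exact (h1.and h2).imp (fun h => lt_of_le_of_ne h.1 h.2.symm)
  show (PySem.Dict.ofList (PySem.List.sorted
      ((PySem.List.sorted2 (PySem.Dict.ofList V).items (fun p => p.1) (fun p => p.2)).foldl
        (fun g p => if g.contains p.2 then g.insert p.2 (g.getD p.2 [] ++ [p.1]) else g.insert p.2 [p.1])
        PySem.Dict.empty).items (fun p => p.1) true)).items
    = bGroup d
  rw [hdeg, hsort2, hstep, ← hG]
  rw [ofList_items_of_nodup _ hfinnd, hfinal]
  unfold bGroup
  rw [hBfold]

theorem strength_eq (edges : List (Int × Int)) (nodes : List Int)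
    (hD : ¬ D_calculate_weight_node edges nodes) :
    aStrength edges nodes = bStrength edges nodes := by
  apply PySem.Dict.ext
  have hka := aStrength_keys edges nodes
  have hkb := bStrength_keys edges nodes
  have hnda : (aStrength edges nodes).keys.Nodup := by
    rw [hka]; exact PySem.Set.nodup_ofList nodes
  have hndb : (bStrength edges nodes).keys.Nodup := by
    rw [hkb]; exact PySem.Set.nodup_ofList nodes
  rw [PySem.Dict.items_eq_map_keys _ hnda 0, PySem.Dict.items_eq_map_keys _ hndb 0, hka, hkb]
  apply List.map_congr_left
  intro k hk
  have hkn : k ∈ nodes := (PySem.Set.mem_ofList nodes k).mp hk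
  have hv : (aStrength edges nodes).getD k 0 = (bStrength edges nodes).getD k 0 := by
    rw [aStrength_getD, bStrength_getD edges nodes k hkn]
    rcases Nat.lt_or_ge (nodes.count k) 2 with hc | hc
    · have h1 : nodes.count k = 1 :=
        le_antisymm (by omega) (List.count_pos_iff.mpr hkn)
      rw [h1]; push_cast; ring
    · by_cases hany : edges.any (fun e => e.1 == k || e.2 == k) = true
      · exact absurd ⟨k, hkn, hc, hany⟩ hD
      have h2 : edges.any (fun e => e.1 == k || e.2 == k) = false :=
        Bool.eq_false_iff.mpr hany
      have h3 : edges.countP (incB k) = 0 := by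
        rw [List.countP_eq_zero]
        intro e he
        simp only [incB]
        exact List.any_eq_false.mp h2 e he
      rw [h3]; push_cast; ring
  exact congrArg (fun v => (k, v)) hv

-- ===== VERDICT (by name: the statement is the Claim_ definition above) =====
theorem calculate_weight_node_spec : Claim_unchanged_calculate_weight_node := by
  intro edges nodes _ hD
  have hnd : (bStrength edges nodes).keys.Nodup := by
    rw [bStrength_keys]; exact PySem.Set.nodup_ofList nodes
  calc calculate_weight_node edges nodes
      = aGroup (bStrength edges nodes) := by
        unfold calculate_weight_node; rw [strength_eq edges nodes hD]
    _ = calculate_weight_node_alt edges nodes := by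
        unfold calculate_weight_node_alt; exact aGroup_eq_bGroup _ hnd

theorem calculate_weight_node_changed : Claim_changed_calculate_weight_node := by
  unfold Claim_changed_calculate_weight_node; decide
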